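-- pv_equiv track=rewrite | github.com/Kaliend/dubbing-casting | obsazovani/exporter.py | build_komplet_header_fill_map
-- ===== SOURCE A (Python) =====
-- def column_name(index: int) -> str:
--     if index <= 0:
--         raise ValueError("Column index must be positive.")
--
--     label = ""
--     current = index
--     while current:
--         current, remainder = divmod(current - 1, 26)
--         label = chr(65 + remainder) + label
--     return label
--
-- def build_komplet_header_fill_map(
--     episode_labels: list[str],
--     primary_fill_id: int,
--     episode_fill_id: int,
--     summary_fill_id: int,
--     note_fill_id: int,
-- ) -> dict[str, int]:
--     fill_map = {"A": primary_fill_id}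
--     for column_index in range(2, len(episode_labels) + 2):
--         fill_map[column_name(column_index)] = episode_fill_id
--
--     actor_column = len(episode_labels) + 2
--     inputs_column = len(episode_labels) + 3
--     replicas_column = len(episode_labels) + 4
--     note_column = len(episode_labels) + 5
--     fill_map[column_name(actor_column)] = primary_fill_id
--     fill_map[column_name(inputs_column)] = summary_fill_id
--     fill_map[column_name(replicas_column)] = summary_fill_id
--     fill_map[column_name(note_column)] = note_fill_id
--     return fill_map
-- ===== SOURCE B (Python) =====
-- def _succ_rev(rev):
--     # rev holds the label's characters in reverse (least significant first).
--     if not rev: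
--         return ["A"]
--     if rev[0] == "Z":
--         return ["A"] + _succ_rev(rev[1:])
--     return [chr(ord(rev[0]) + 1)] + rev[1:]
--
-- def build_komplet_header_fill_map(
--     episode_labels,
--     primary_fill_id,
--     episode_fill_id,
--     summary_fill_id,
--     note_fill_id,
-- ):
--     fill_ids = (
--         [primary_fill_id]
--         + [episode_fill_id] * len(episode_labels)
--         + [primary_fill_id, summary_fill_id, summary_fill_id, note_fill_id]
--     )
--     fill_map = {}
--     rev = []
--     for fid in fill_ids:
--         rev = _succ_rev(rev)
--         fill_map["".join(reversed(rev))] = fid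
--     return fill_map
-- ===== Notes on version B (the rewrite author's own statement) =====
-- stated objective: alternative
-- what changed: B builds the ordered fill-id list up front and generates the column labels incrementally with a spreadsheet-style carry (Z rolls to A, possibly prepending a letter), instead of A's per-column base-26 divmod reconstruction inside special-cased insert statements.
import Mathlib
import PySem

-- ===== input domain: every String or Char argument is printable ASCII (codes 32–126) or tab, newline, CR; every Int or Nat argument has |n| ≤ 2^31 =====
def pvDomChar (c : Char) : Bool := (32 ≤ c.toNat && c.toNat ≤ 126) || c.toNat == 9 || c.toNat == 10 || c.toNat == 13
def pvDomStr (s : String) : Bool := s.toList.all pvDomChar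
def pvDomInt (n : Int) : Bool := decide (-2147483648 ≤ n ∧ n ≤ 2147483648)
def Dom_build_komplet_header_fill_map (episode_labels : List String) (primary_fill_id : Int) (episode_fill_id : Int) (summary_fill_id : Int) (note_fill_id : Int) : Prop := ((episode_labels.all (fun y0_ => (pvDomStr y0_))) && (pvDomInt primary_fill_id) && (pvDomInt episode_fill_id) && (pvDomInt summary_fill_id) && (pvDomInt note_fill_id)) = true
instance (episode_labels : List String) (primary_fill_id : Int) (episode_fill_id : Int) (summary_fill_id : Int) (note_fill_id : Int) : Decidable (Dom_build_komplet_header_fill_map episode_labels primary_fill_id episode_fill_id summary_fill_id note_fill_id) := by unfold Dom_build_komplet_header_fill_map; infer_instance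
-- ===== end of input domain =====

-- B replaces A's per-column base-26 divmod label reconstruction by one pass that advances the
-- label incrementally with a spreadsheet carry over a prebuilt fill-id list (objective: alternative).

-- ===== PORT A =====
-- the 'while current:' loop of column_name; 'current' is nonnegative on every call build_… makes,
-- so the loop runs over Nat exactly: divmod(current-1, 26) with current = n+1 is (n / 26, n % 26)
def pvColLoop : Nat → List Char → List Char
  | 0, label => label
  | n + 1, label => pvColLoop (n / 26) (Char.ofNat (65 + n % 26) :: label)
  decreasing_by exact Nat.lt_succ_of_le (Nat.div_le_self n 26)

-- A raises ValueError for index ≤ 0; build_… only calls it with index ≥ 2, so that branch is dead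
def pvColumnName (index : Int) : String :=
  if index ≤ 0 then "" else String.ofList (pvColLoop index.toNat [])

def build_komplet_header_fill_map (episode_labels : List String) (primary_fill_id : Int) (episode_fill_id : Int) (summary_fill_id : Int) (note_fill_id : Int) : List (String × Int) :=
  let fill_map : PySem.Dict String Int := (PySem.Dict.empty).insert "A" primary_fill_id
  let fill_map := (PySem.List.pyRange 2 ((episode_labels.length : Int) + 2) 1).foldl
      (fun d column_index => d.insert (pvColumnName column_index) episode_fill_id) fill_map
  let actor_column : Int := (episode_labels.length : Int) + 2
  let inputs_column : Int := (episode_labels.length : Int) + 3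
  let replicas_column : Int := (episode_labels.length : Int) + 4
  let note_column : Int := (episode_labels.length : Int) + 5
  (((((fill_map.insert (pvColumnName actor_column) primary_fill_id).insert
      (pvColumnName inputs_column) summary_fill_id).insert
      (pvColumnName replicas_column) summary_fill_id).insert
      (pvColumnName note_column) note_fill_id)).items

-- ===== PORT B =====
-- _succ_rev: increment a reversed label, rolling 'Z' to 'A' with carry
def pvSuccRev : List Char → List Char
  | [] => ['A']
  | c :: rest => if c = 'Z' then 'A' :: pvSuccRev rest else Char.ofNat (c.toNat + 1) :: rest

def build_komplet_header_fill_map_alt (episode_labels : List String) (primary_fill_id : Int) (episode_fill_id : Int) (summary_fill_id : Int) (note_fill_id : Int) : List (String × Int) :=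
  let fill_ids : List Int :=
    primary_fill_id :: (List.replicate episode_labels.length episode_fill_id
      ++ [primary_fill_id, summary_fill_id, summary_fill_id, note_fill_id])
  (fill_ids.foldl
    (fun (st : List Char × PySem.Dict String Int) fid =>
      let rev := pvSuccRev st.1
      (rev, st.2.insert (String.ofList rev.reverse) fid))
    ([], PySem.Dict.empty)).2.items

-- ===== PRECONDITION & SPEC =====
def Spec_build_komplet_header_fill_map (episode_labels : List String) (primary_fill_id : Int) (episode_fill_id : Int) (summary_fill_id : Int) (note_fill_id : Int) (out : List (String × Int)) : Prop := out = build_komplet_header_fill_map_alt episode_labels primary_fill_id episode_fill_id summary_fill_id note_fill_id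
instance (episode_labels : List String) (primary_fill_id : Int) (episode_fill_id : Int) (summary_fill_id : Int) (note_fill_id : Int) (out : List (String × Int)) : Decidable (Spec_build_komplet_header_fill_map episode_labels primary_fill_id episode_fill_id summary_fill_id note_fill_id out) := by unfold Spec_build_komplet_header_fill_map; infer_instance

-- ===== CLAIM (what is proved, stated in full; the proofs are below) =====
def Claim_equal_build_komplet_header_fill_map : Prop := ∀ (episode_labels : List String) (primary_fill_id : Int) (episode_fill_id : Int) (summary_fill_id : Int) (note_fill_id : Int), Dom_build_komplet_header_fill_map episode_labels primary_fill_id episode_fill_id summary_fill_id note_fill_id → Spec_build_komplet_header_fill_map episode_labels primary_fill_id episode_fill_id summary_fill_id note_fill_id (build_komplet_header_fill_map episode_labels primary_fill_id episode_fill_id summary_fill_id note_fill_id)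

-- ===== LEMMAS AND PROOFS =====

-- reversed bijective base-26 digits of a (1-based) column number; revLabel 0 = []
def revLabel : Nat → List Char
  | 0 => []
  | n + 1 => Char.ofNat (65 + n % 26) :: revLabel (n / 26)
  decreasing_by exact Nat.lt_succ_of_le (Nat.div_le_self n 26)

lemma revLabel_zero : revLabel 0 = [] := by rw [revLabel]

lemma revLabel_succ (n : Nat) : revLabel (n + 1) = Char.ofNat (65 + n % 26) :: revLabel (n / 26) := by
  rw [revLabel]

def colName (k : Nat) : String := String.ofList (revLabel k).reverse

lemma char_toNat (r : Nat) (h : r < 26) : (Char.ofNat (65 + r)).toNat = 65 + r := by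
  have H : ∀ r : Fin 26, (Char.ofNat (65 + r.val)).toNat = 65 + r.val := by decide
  exact H ⟨r, h⟩

lemma char_ne_Z (r : Nat) (h : r < 25) : Char.ofNat (65 + r) ≠ 'Z' := by
  have H : ∀ r : Fin 25, Char.ofNat (65 + r.val) ≠ 'Z' := by decide
  exact H ⟨r, h⟩

lemma colLoop_eq : ∀ (n : Nat) (acc : List Char),
    pvColLoop n acc = (revLabel n).reverse ++ acc := by
  intro n
  induction n using Nat.strong_induction_on with
  | _ n ih =>
    intro acc
    match n with
    | 0 => rw [pvColLoop, revLabel_zero]; rfl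
    | m + 1 =>
      rw [pvColLoop, revLabel_succ, ih (m / 26) (Nat.lt_succ_of_le (Nat.div_le_self m 26))]
      simp

lemma pvColumnName_eq (k : Nat) (hk : 1 ≤ k) : pvColumnName (k : Int) = colName k := by
  have hneg : ¬ ((k : Int) ≤ 0) := by exact_mod_cast (by omega : ¬ (k ≤ 0))
  unfold pvColumnName
  rw [if_neg hneg]
  simp [colLoop_eq, colName]

lemma succRev_revLabel : ∀ n : Nat, pvSuccRev (revLabel n) = revLabel (n + 1) := by
  intro n
  induction n using Nat.strong_induction_on with
  | _ n ih =>
    match n with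
    | 0 =>
      rw [revLabel_zero, revLabel_succ 0, Nat.zero_mod, Nat.zero_div, revLabel_zero]
      decide
    | m + 1 =>
      have hm26 : m % 26 < 26 := Nat.mod_lt m (by omega)
      by_cases h : m % 26 = 25
      · have hz : Char.ofNat (65 + m % 26) = 'Z' := by rw [h]
        have e1 : (m + 1) % 26 = 0 := by omega
        have e2 : (m + 1) / 26 = m / 26 + 1 := by omega
        have hrhs : revLabel (m + 1 + 1) = 'A' :: revLabel (m / 26 + 1) := by
          rw [revLabel_succ (m + 1), e1, e2]
        rw [revLabel_succ m, pvSuccRev, if_pos hz,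
            ih (m / 26) (Nat.lt_succ_of_le (Nat.div_le_self m 26)), hrhs]
      · have hr : m % 26 < 25 := by omega
        have e1 : (m + 1) % 26 = m % 26 + 1 := by omega
        have e2 : (m + 1) / 26 = m / 26 := by omega
        have e3 : 65 + m % 26 + 1 = 65 + (m % 26 + 1) := by omega
        rw [revLabel_succ m, pvSuccRev, if_neg (char_ne_Z _ hr), char_toNat _ hm26,
            revLabel_succ (m + 1), e1, e2, e3]

lemma revLabel_inj : ∀ a b : Nat, revLabel a = revLabel b → a = b := by
  intro a
  induction a using Nat.strong_induction_on with
  | _ a ih =>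
    intro b h
    match a, b with
    | 0, 0 => rfl
    | 0, p + 1 => rw [revLabel_zero, revLabel_succ] at h; exact absurd h (by simp)
    | m + 1, 0 => rw [revLabel_zero, revLabel_succ] at h; exact absurd h (by simp)
    | m + 1, p + 1 =>
      rw [revLabel_succ, revLabel_succ, List.cons.injEq] at h
      have hm := char_toNat (m % 26) (Nat.mod_lt m (by omega))
      have hp := char_toNat (p % 26) (Nat.mod_lt p (by omega))
      have hmod : m % 26 = p % 26 := by
        have := congrArg Char.toNat h.1
        rw [hm, hp] at this; omega
      have hdiv : m / 26 = p / 26 :=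
        ih (m / 26) (Nat.lt_succ_of_le (Nat.div_le_self m 26)) _ h.2
      omega

lemma colName_inj {a b : Nat} (h : colName a = colName b) : a = b := by
  apply revLabel_inj
  have := congrArg String.toList h
  simp only [colName, String.toList_ofList] at this
  exact List.reverse_injective this

-- pairUp k fids : the (label, id) pairs for columns k+1, k+2, …
def pairUp : Nat → List Int → List (String × Int)
  | _, [] => []
  | k, f :: fs => (colName (k + 1), f) :: pairUp (k + 1) fs

lemma pairUp_append (xs ys : List Int) : ∀ k,
    pairUp k (xs ++ ys) = pairUp k xs ++ pairUp (k + xs.length) ys := by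
  induction xs with
  | nil => simp [pairUp]
  | cons x xs ih =>
    intro k
    simp only [List.cons_append, pairUp, ih (k + 1), List.length_cons, List.cons_append]
    rw [show k + 1 + xs.length = k + (xs.length + 1) by omega]

lemma pairUp_replicate (e : Int) : ∀ (n k : Nat),
    pairUp k (List.replicate n e) = (List.range n).map (fun j => (colName (k + 1 + j), e)) := by
  intro n
  induction n with
  | zero => intro k; simp [pairUp]
  | succ n ih =>
    intro k
    rw [List.replicate_succ, pairUp, ih (k + 1), List.range_succ_eq_map, List.map_cons,
        List.map_map]
    refine congrArg₂ List.cons (by simp) ?_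
    apply List.map_congr_left
    intro j _
    simp only [Function.comp_apply]
    rw [show k + 1 + 1 + j = k + 1 + (j + 1) by omega]

-- B's fold appends fresh labelled pairs
lemma B_fold (fids : List Int) : ∀ (k : Nat) (d : PySem.Dict String Int),
    (∀ s ∈ d.keys, ∃ j, 1 ≤ j ∧ j ≤ k ∧ s = colName j) →
    ((fids.foldl
      (fun (st : List Char × PySem.Dict String Int) fid =>
        let rev := pvSuccRev st.1
        (rev, st.2.insert (String.ofList rev.reverse) fid))
      (revLabel k, d)).2).items = d.items ++ pairUp k fids := by
  induction fids with
  | nil => intro k d _; simp [pairUp]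
  | cons f fs ih =>
    intro k d hkeys
    have hsr : pvSuccRev (revLabel k) = revLabel (k + 1) := succRev_revLabel k
    have hfresh : d.contains (colName (k + 1)) = false := by
      rw [PySem.Dict.contains_eq_decide_mem_keys]
      simp only [decide_eq_false_iff_not]
      intro hmem
      obtain ⟨j, hj1, hjk, hje⟩ := hkeys _ hmem
      have := colName_inj hje.symm
      omega
    have hkeys' : ∀ s ∈ (d.insert (colName (k + 1)) f).keys,
        ∃ j, 1 ≤ j ∧ j ≤ k + 1 ∧ s = colName j := by
      intro s hs
      rw [PySem.Dict.mem_keys_insert] at hs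
      cases hs with
      | inl h => exact ⟨k + 1, by omega, by omega, h⟩
      | inr h => obtain ⟨j, hj1, hjk, hje⟩ := hkeys s h; exact ⟨j, hj1, by omega, hje⟩
    have hstep := ih (k + 1) (d.insert (colName (k + 1)) f) hkeys'
    rw [PySem.Dict.items_insert_of_not_contains _ _ hfresh] at hstep
    calc ((List.foldl
        (fun (st : List Char × PySem.Dict String Int) fid =>
          let rev := pvSuccRev st.1
          (rev, st.2.insert (String.ofList rev.reverse) fid))
        (revLabel k, d) (f :: fs)).2).items
        = ((List.foldl
        (fun (st : List Char × PySem.Dict String Int) fid =>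
          let rev := pvSuccRev st.1
          (rev, st.2.insert (String.ofList rev.reverse) fid))
        (revLabel (k + 1), d.insert (colName (k + 1)) f) fs).2).items := by
          rw [List.foldl_cons]
          simp only [hsr]
          rfl
      _ = (d.items ++ [(colName (k + 1), f)]) ++ pairUp (k + 1) fs := hstep
      _ = d.items ++ pairUp k (f :: fs) := by rw [pairUp]; simp

-- characterisation of A's result
lemma A_items (episode_labels : List String) (p e s nt : Int) :
    build_komplet_header_fill_map episode_labels p e s nt =
    (colName 1, p) ::
      ((List.range episode_labels.length).map (fun j => (colName (j + 2), e)) ++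
       [(colName (episode_labels.length + 2), p), (colName (episode_labels.length + 3), s),
        (colName (episode_labels.length + 4), s), (colName (episode_labels.length + 5), nt)]) := by
  unfold build_komplet_header_fill_map
  set n := episode_labels.length with hn
  have hrange : PySem.List.pyRange 2 ((n : Int) + 2) 1
      = (List.range n).map (fun j : Nat => ((2 : Int) + (j : Int))) := by
    have ht : (((n : Int) + 2) - 2).toNat = n := by omega
    rw [PySem.List.pyRange_one, ht]
  have hA1 : ("A" : String) = colName 1 := by
    unfold colName
    rw [revLabel_succ 0, revLabel_zero]
    decide
  have hd0 : ((PySem.Dict.empty : PySem.Dict String Int).insert "A" p).items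
      = [(colName 1, p)] := by
    rw [PySem.Dict.items_insert_of_not_contains _ _ (PySem.Dict.contains_empty _)]
    simp [hA1, PySem.Dict.empty]
  have hcn : ∀ j : Nat, pvColumnName ((2 : Int) + j) = colName (j + 2) := by
    intro j
    rw [show (2 : Int) + j = ((j + 2 : Nat) : Int) by push_cast; ring]
    exact pvColumnName_eq (j + 2) (by omega)
  have hfold :
      ((List.range n).map (fun j : Nat => ((2 : Int) + (j : Int)))).foldl
        (fun d column_index => d.insert (pvColumnName column_index) e)
        ((PySem.Dict.empty : PySem.Dict String Int).insert "A" p)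
      = ((List.range n).foldl
        (fun d j => d.insert (colName (j + 2)) e)
        ((PySem.Dict.empty : PySem.Dict String Int).insert "A" p)) := by
    rw [List.foldl_map]
    refine PySem.List.foldl_congr_mem _ _ _ _ ?_
    intro acc x _
    rw [hcn x]
  have hfresh : ∀ j ∈ List.range n,
      ((PySem.Dict.empty : PySem.Dict String Int).insert "A" p).contains (colName (j + 2)) = false := by
    intro j _
    rw [PySem.Dict.contains_eq_decide_mem_keys]
    simp only [decide_eq_false_iff_not]
    intro hmem
    have h1 : colName (j + 2) = colName 1 := by
      have : ((PySem.Dict.empty : PySem.Dict String Int).insert "A" p).keys = [colName 1] := by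
        simp [PySem.Dict.keys, hd0]
      rw [this] at hmem
      simpa using hmem
    have := colName_inj h1
    omega
  have hnodup : ((List.range n).map (fun j => colName (j + 2))).Nodup := by
    apply List.Nodup.map_on ?_ (List.nodup_range)
    intro a _ b _ h
    have := colName_inj h
    omega
  have hfitems := PySem.Dict.items_foldl_insert_fresh (List.range n)
      (fun j => colName (j + 2)) (fun _ => e)
      ((PySem.Dict.empty : PySem.Dict String Int).insert "A" p) hfresh hnodup
  set F := (List.range n).foldl
      (fun d j => d.insert (colName (j + 2)) e)
      ((PySem.Dict.empty : PySem.Dict String Int).insert "A" p) with hF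
  have hFitems : F.items = (colName 1, p) ::
      (List.range n).map (fun j => (colName (j + 2), e)) := by
    rw [hF]
    simpa [hd0] using hfitems
  have hFkeys : ∀ s' ∈ F.keys, ∃ j, 1 ≤ j ∧ j < n + 2 ∧ s' = colName j := by
    intro s' hs'
    simp only [PySem.Dict.keys, hFitems, List.map_cons, List.map_map, List.mem_cons,
      List.mem_map, List.mem_range] at hs'
    cases hs' with
    | inl h => exact ⟨1, by omega, by omega, h⟩
    | inr h =>
      obtain ⟨j, hj, hje⟩ := h
      exact ⟨j + 2, by omega, by omega, by simpa using hje.symm⟩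
  have g2 : ((n : Int) + 2) = (((n + 2 : Nat)) : Int) := by push_cast; ring
  have g3 : ((n : Int) + 3) = (((n + 3 : Nat)) : Int) := by push_cast; ring
  have g4 : ((n : Int) + 4) = (((n + 4 : Nat)) : Int) := by push_cast; ring
  have g5 : ((n : Int) + 5) = (((n + 5 : Nat)) : Int) := by push_cast; ring
  have fresh_of : ∀ (d : PySem.Dict String Int) (m : Nat),
      (∀ s' ∈ d.keys, ∃ j, 1 ≤ j ∧ j < m ∧ s' = colName j) →
      d.contains (colName m) = false := by
    intro d m hk
    rw [PySem.Dict.contains_eq_decide_mem_keys]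
    simp only [decide_eq_false_iff_not]
    intro hmem
    obtain ⟨j, hj1, hjm, hje⟩ := hk _ hmem
    have := colName_inj hje.symm
    omega
  have keys_step : ∀ (d : PySem.Dict String Int) (m : Nat) (v : Int), 1 ≤ m →
      (∀ s' ∈ d.keys, ∃ j, 1 ≤ j ∧ j < m ∧ s' = colName j) →
      (∀ s' ∈ (d.insert (colName m) v).keys, ∃ j, 1 ≤ j ∧ j < m + 1 ∧ s' = colName j) := by
    intro d m v hm hk s' hs'
    rw [PySem.Dict.mem_keys_insert] at hs'
    cases hs' with
    | inl h => exact ⟨m, hm, by omega, h⟩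
    | inr h => obtain ⟨j, hj1, hjm, hje⟩ := hk s' h; exact ⟨j, hj1, by omega, hje⟩
  have hk2 : ∀ s' ∈ F.keys, ∃ j, 1 ≤ j ∧ j < n + 2 ∧ s' = colName j := hFkeys
  have c2 := fresh_of F (n + 2) hk2
  have hk3 := keys_step F (n + 2) p (by omega) hk2
  have c3 := fresh_of _ (n + 3) (by intro s' hs'; obtain ⟨j, a1, a2, a3⟩ := hk3 s' hs'; exact ⟨j, a1, by omega, a3⟩)
  have hk4 := keys_step _ (n + 3) s (by omega) (by intro s' hs'; obtain ⟨j, a1, a2, a3⟩ := hk3 s' hs'; exact ⟨j, a1, by omega, a3⟩)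
  have c4 := fresh_of _ (n + 4) (by intro s' hs'; obtain ⟨j, a1, a2, a3⟩ := hk4 s' hs'; exact ⟨j, a1, by omega, a3⟩)
  have hk5 := keys_step _ (n + 4) s (by omega) (by intro s' hs'; obtain ⟨j, a1, a2, a3⟩ := hk4 s' hs'; exact ⟨j, a1, by omega, a3⟩)
  have c5 := fresh_of _ (n + 5) (by intro s' hs'; obtain ⟨j, a1, a2, a3⟩ := hk5 s' hs'; exact ⟨j, a1, by omega, a3⟩)
  simp only [hrange, hfold]
  rw [g2, g3, g4, g5, pvColumnName_eq (n + 2) (by omega), pvColumnName_eq (n + 3) (by omega),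
      pvColumnName_eq (n + 4) (by omega), pvColumnName_eq (n + 5) (by omega)]
  rw [PySem.Dict.items_insert_of_not_contains _ _ c5,
      PySem.Dict.items_insert_of_not_contains _ _ c4,
      PySem.Dict.items_insert_of_not_contains _ _ c3,
      PySem.Dict.items_insert_of_not_contains _ _ c2,
      hFitems]
  simp

lemma B_items (episode_labels : List String) (p e s nt : Int) :
    build_komplet_header_fill_map_alt episode_labels p e s nt =
    pairUp 0 (p :: (List.replicate episode_labels.length e ++ [p, s, s, nt])) := by
  unfold build_komplet_header_fill_map_alt
  have h := B_fold (p :: (List.replicate episode_labels.length e ++ [p, s, s, nt])) 0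
      PySem.Dict.empty (by intro s' hs'; simp [PySem.Dict.keys, PySem.Dict.empty] at hs')
  rw [← revLabel_zero]
  simpa using h

-- ===== VERDICT (by name: the statement is the Claim_ definition above) =====
theorem build_komplet_header_fill_map_spec : Claim_equal_build_komplet_header_fill_map := by
  intro episode_labels p e s nt _
  unfold Spec_build_komplet_header_fill_map
  rw [A_items, B_items]
  set n := episode_labels.length
  rw [pairUp, pairUp_append, pairUp_replicate]
  simp only [List.length_replicate]
  congr 1
  · congr 1
    · apply List.map_congr_left
      intro j _
      rw [show 0 + 1 + 1 + j = j + 2 by omega]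
    · simp only [pairUp]
      rw [show 0 + 1 + n + 1 = n + 2 by omega, show n + 2 + 1 = n + 3 by omega,
          show n + 3 + 1 = n + 4 by omega, show n + 4 + 1 = n + 5 by omega]
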